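-- pv_equiv track=rewrite | github.com/whanhee97/operatingSystemTermProject | TermProj4.py | mostFar
-- ===== SOURCE A (Python) =====
-- def mostFar(frames,currentIndex,referenceStr):
--     for i in range(4):# 프레임 4개를 검사해서 각각의 거리를 저장
--         distance = 1
--         check = False
--         for j in range(currentIndex+1,len(referenceStr)):
--             if(referenceStr[j] == frames[i][0]): #값과 일치하는게 있으면 멈추고 거리 저장
--                 frames[i][1] = distance
--                 check = True
--                 break
--             distance +=1
--         if not check:
--             frames[i][1] = 100 #없으면 거리를 100으로 저장
--
--     maxDistance = 0
--     mostFarIndex = 0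
--     for i in range(3,-1,-1): #마지막 프레임부터 검사해서 가장 거리가 먼 프레임 인덱스 저장
--         if frames[i][1] >= maxDistance:
--             maxDistance = frames[i][1]
--             mostFarIndex = i
--
--     return mostFarIndex # 제일 먼 프레임의 인덱스를 반환
-- ===== SOURCE B (Python) =====
-- # Single forward sweep over the reference string resolving all four frames at once
-- # (instead of one scan per frame), with early exit once every frame is resolved;
-- # argmax picked in one ascending pass.  Same in-place update of frames[i][1] as A.
-- def mostFar(frames, currentIndex, referenceStr):
--     dist = [None, None, None, None]
--     unresolved = 4
--     for j in range(currentIndex + 1, len(referenceStr)):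
--         if unresolved == 0:
--             break
--         r = referenceStr[j]
--         for i in range(4):
--             if dist[i] is None and frames[i][0] == r:
--                 dist[i] = j - currentIndex
--                 unresolved -= 1
--     for i in range(4):
--         frames[i][1] = 100 if dist[i] is None else dist[i]
--     best = 0
--     for i in range(1, 4):
--         if frames[i][1] > frames[best][1]:
--             best = i
--     return best
-- ===== Notes on version B (the rewrite author's own statement) =====
-- stated objective: alternative
-- what changed: Replaces A's four independent forward scans of the reference string (one per frame) by a single fused sweep that resolves all four frames' next-use distances at once (with an early exit once all are resolved), then picks the smallest argmax index in one ascending strict-comparison pass instead of A's descending >= pass.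
import Mathlib
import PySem

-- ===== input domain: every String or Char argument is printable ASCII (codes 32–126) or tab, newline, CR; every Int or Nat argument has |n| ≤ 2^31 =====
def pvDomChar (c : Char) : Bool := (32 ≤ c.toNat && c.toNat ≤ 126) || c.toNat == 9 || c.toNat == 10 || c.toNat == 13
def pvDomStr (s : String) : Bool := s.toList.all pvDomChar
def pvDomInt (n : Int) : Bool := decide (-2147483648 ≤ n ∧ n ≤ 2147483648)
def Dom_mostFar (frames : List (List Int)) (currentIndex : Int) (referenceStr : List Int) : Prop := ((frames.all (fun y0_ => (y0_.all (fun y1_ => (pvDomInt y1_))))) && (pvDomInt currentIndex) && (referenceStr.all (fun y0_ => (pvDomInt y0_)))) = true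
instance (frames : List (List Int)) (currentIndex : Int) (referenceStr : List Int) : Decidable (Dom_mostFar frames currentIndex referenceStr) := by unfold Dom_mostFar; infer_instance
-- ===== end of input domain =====

-- B fuses A's four per-frame forward scans into one sweep (early exit when all four
-- are resolved) and an ascending argmax pass — an alternative decomposition of the same
-- cost; the equivalence proved is about the RETURN value only (both Pythons perform the
-- same in-place update of frames[i][1]).

-- ===== PORT A =====
-- inner loop of A for one frame value v: scan j over js, distance counter starts at `dist`
def pvScanA (ref : List Int) (v : Int) : List Int → Int → Option Int
  | [], _ => none
  | j :: rest, dist =>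
      if (PySem.List.pyGet? ref j).getD 0 = v then some dist
      else pvScanA ref v rest (dist + 1)

def mostFar (frames : List (List Int)) (currentIndex : Int) (referenceStr : List Int) : Int :=
  -- first loop: frames[i][1] becomes the distance (or 100); we record those values as `dists`
  let dists := (PySem.List.pyRange 0 4 1).map (fun i =>
    let v := (PySem.List.pyGet? ((PySem.List.pyGet? frames i).getD []) 0).getD 0
    match pvScanA referenceStr v (PySem.List.pyRange (currentIndex + 1) referenceStr.length 1) 1 with
    | some d => d
    | none => 100)
  -- second loop: i from 3 down to 0, keep on >=
  let sel := (PySem.List.pyRange 3 (-1) (-1)).foldl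
    (fun (s : Int × Int) i =>
      if (PySem.List.pyGet? dists i).getD 0 ≥ s.1 then ((PySem.List.pyGet? dists i).getD 0, i) else s)
    (0, 0)
  sel.2

-- ===== PORT B =====
-- one sweep step: resolve every still-unresolved frame whose value equals referenceStr[j]
def pvStepB (ref : List Int) (c : Int) (j : Int) (st : List (Int × Option Int)) : List (Int × Option Int) :=
  st.map (fun p => if p.2 = none ∧ p.1 = (PySem.List.pyGet? ref j).getD 0 then (p.1, some (j - c)) else p)

-- the sweep over js, breaking early once every frame is resolved
def pvSweep (ref : List Int) (c : Int) : List Int → List (Int × Option Int) → List (Int × Option Int)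
  | [], st => st
  | j :: rest, st =>
      if st.all (fun p => p.2.isSome) then st
      else pvSweep ref c rest (pvStepB ref c j st)

def mostFar_alt (frames : List (List Int)) (currentIndex : Int) (referenceStr : List Int) : Int :=
  let vals := (PySem.List.pyRange 0 4 1).map (fun i =>
    (PySem.List.pyGet? ((PySem.List.pyGet? frames i).getD []) 0).getD 0)
  let st := pvSweep referenceStr currentIndex
    (PySem.List.pyRange (currentIndex + 1) referenceStr.length 1)
    (vals.map (fun v => (v, (none : Option Int))))
  let d : List Int := st.map (fun p => p.2.getD 100)
  (PySem.List.pyRange 1 4 1).foldl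
    (fun (best : Int) i =>
      if (PySem.List.pyGet? d i).getD 0 > (PySem.List.pyGet? d best).getD 0 then i else best)
    0

-- ===== PRECONDITION & SPEC =====
-- Pre_ = exactly the inputs where Python A returns (no IndexError): at least four frames,
-- each of the first four with at least two cells, and every scanned index in wrap range.
def Pre_mostFar (frames : List (List Int)) (currentIndex : Int) (referenceStr : List Int) : Prop :=
  4 ≤ frames.length ∧ (∀ f ∈ frames.take 4, 2 ≤ f.length) ∧
    -(referenceStr.length : Int) ≤ currentIndex + 1
instance (frames : List (List Int)) (currentIndex : Int) (referenceStr : List Int) : Decidable (Pre_mostFar frames currentIndex referenceStr) := by unfold Pre_mostFar; infer_instance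
def pvWitness_mostFar : List (List Int) × Int × List Int := ([[1, 0], [2, 0], [3, 0], [4, 0]], 0, [2, 1])

def Spec_mostFar (frames : List (List Int)) (currentIndex : Int) (referenceStr : List Int) (out : Int) : Prop := out = mostFar_alt frames currentIndex referenceStr
instance (frames : List (List Int)) (currentIndex : Int) (referenceStr : List Int) (out : Int) : Decidable (Spec_mostFar frames currentIndex referenceStr out) := by unfold Spec_mostFar; infer_instance

-- ===== CLAIM (what is proved, stated in full; the proofs are below) =====
def Claim_equal_mostFar : Prop := ∀ (frames : List (List Int)) (currentIndex : Int) (referenceStr : List Int), Dom_mostFar frames currentIndex referenceStr → Pre_mostFar frames currentIndex referenceStr → Spec_mostFar frames currentIndex referenceStr (mostFar frames currentIndex referenceStr)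

-- ===== LEMMAS AND PROOFS =====

-- a fully resolved state is a fixed point of one sweep step
theorem pvStepB_resolved (ref : List Int) (c j : Int) (st : List (Int × Option Int))
    (h : st.all (fun p => p.2.isSome) = true) : pvStepB ref c j st = st := by
  unfold pvStepB
  induction st with
  | nil => rfl
  | cons a l ih =>
      simp only [List.all_cons, Bool.and_eq_true] at h
      have ha : a.2 ≠ none := by
        cases h2 : a.2 <;> simp [h2] at h ⊢
      simp [List.map, ha, ih h.2]

-- the early break does not change the sweep's result: sweep = plain foldl of steps
-- a fully resolved state is a fixed point of the whole fold of steps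
theorem pvFoldl_resolved (ref : List Int) (c : Int) (js : List Int) (st : List (Int × Option Int))
    (h : st.all (fun p => p.2.isSome) = true) :
    js.foldl (fun s j => pvStepB ref c j s) st = st := by
  induction js with
  | nil => rfl
  | cons j rest ih => rw [List.foldl_cons, pvStepB_resolved ref c j st h, ih]

-- the early break does not change the sweep's result: sweep = plain foldl of steps
theorem pvSweep_eq_foldl (ref : List Int) (c : Int) (js : List Int) (st : List (Int × Option Int)) :
    pvSweep ref c js st = js.foldl (fun s j => pvStepB ref c j s) st := by
  induction js generalizing st with
  | nil => rfl
  | cons j rest ih =>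
      rw [pvSweep, List.foldl_cons]
      by_cases h : st.all (fun p => p.2.isSome) = true
      · rw [if_pos h, pvStepB_resolved ref c j st h, pvFoldl_resolved ref c rest st h]
      · rw [if_neg h, ih]

-- the fused fold acts on each state entry independently
theorem foldl_map_step {α β : Type} (g : Int → α → α) (js : List Int) (xs : List β) (h : β → α) :
    js.foldl (fun st j => st.map (g j)) (xs.map h)
      = xs.map (fun x => js.foldl (fun q j => g j q) (h x)) := by
  induction js generalizing h with
  | nil => rfl
  | cons j rest ih =>
      simp only [List.foldl_cons, List.map_map]
      exact ih (fun x => g j (h x))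

-- once resolved, the per-entry fold is constant
theorem entry_fold_resolved (ref : List Int) (c : Int) (js : List Int) (v x : Int) :
    js.foldl
      (fun (q : Int × Option Int) j =>
        if q.2 = none ∧ q.1 = (PySem.List.pyGet? ref j).getD 0 then (q.1, some (j - c)) else q)
      (v, some x) = (v, some x) := by
  induction js with
  | nil => rfl
  | cons j rest ih => simpa using ih

-- the per-entry fold over pyRange a b 1 computes A's scan (offset a - c), both defaulting to 100
theorem entry_eq_scan (ref : List Int) (c : Int) (b : Int) :
    ∀ (n : Nat) (a : Int), (b - a).toNat = n → ∀ v : Int,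
    (((PySem.List.pyRange a b 1).foldl
        (fun (q : Int × Option Int) j =>
          if q.2 = none ∧ q.1 = (PySem.List.pyGet? ref j).getD 0 then (q.1, some (j - c)) else q)
        (v, none)).2.getD 100)
      = (match pvScanA ref v (PySem.List.pyRange a b 1) (a - c) with
         | some d => d | none => 100) := by
  intro n
  induction n with
  | zero =>
      intro a ha v
      rw [PySem.List.pyRange_one_eq_nil (by omega)]
      rfl
  | succ m ih =>
      intro a ha v
      rw [PySem.List.pyRange_one_cons (by omega)]
      by_cases hv : v = (PySem.List.pyGet? ref a).getD 0
      · subst hv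
        simp [List.foldl_cons, pvScanA, entry_fold_resolved]
      · have hne : ¬ ((PySem.List.pyGet? ref a).getD 0 = v) := fun h => hv h.symm
        simp only [List.foldl_cons, pvScanA, if_neg hne, hv, and_false, if_false]
        have : a - c + 1 = a + 1 - c := by ring
        rw [this]
        exact ih (a + 1) (by omega) v


-- A's scan never returns a value below its starting counter
theorem pvScanA_ge (ref : List Int) (v : Int) :
    ∀ (js : List Int) (dist x : Int), pvScanA ref v js dist = some x → dist ≤ x := by
  intro js
  induction js with
  | nil => intro dist x h; simp [pvScanA] at h
  | cons j rest ih =>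
      intro dist x h
      rw [pvScanA] at h
      split_ifs at h with hc
      · simp only [Option.some.injEq] at h; omega
      · have := ih (dist + 1) x h
        omega

-- the 100-defaulted scan value is always positive
theorem match_pos (ref : List Int) (v : Int) (js : List Int) (dist : Int) (hd : 0 < dist) :
    0 < (match pvScanA ref v js dist with | some d => d | none => 100) := by
  rcases h : pvScanA ref v js dist with _ | x
  · norm_num
  · have := pvScanA_ge ref v js dist x h
    simpa using by omega

-- the two selection passes agree on any list of four positive distances
theorem sel_eq (d0 d1 d2 d3 : Int) (p0 : 0 < d0) (p1 : 0 < d1) (p2 : 0 < d2) (p3 : 0 < d3) :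
    ((PySem.List.pyRange 3 (-1) (-1)).foldl
      (fun (s : Int × Int) i =>
        if (PySem.List.pyGet? [d0, d1, d2, d3] i).getD 0 ≥ s.1
        then ((PySem.List.pyGet? [d0, d1, d2, d3] i).getD 0, i) else s) (0, 0)).2
    = (PySem.List.pyRange 1 4 1).foldl
        (fun (best : Int) i =>
          if (PySem.List.pyGet? [d0, d1, d2, d3] i).getD 0
               > (PySem.List.pyGet? [d0, d1, d2, d3] best).getD 0 then i else best) 0 := by
  have h1 : PySem.List.pyRange 3 (-1) (-1) = [3, 2, 1, 0] := by decide
  have h2 : PySem.List.pyRange 1 4 1 = [1, 2, 3] := by decide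
  rw [h1, h2]
  have e0 : (PySem.List.pyGet? [d0, d1, d2, d3] (0 : Int)).getD 0 = d0 := by
    simp [PySem.List.pyGet?, PySem.List.pyIdx?]
  have e1 : (PySem.List.pyGet? [d0, d1, d2, d3] (1 : Int)).getD 0 = d1 := by
    simp [PySem.List.pyGet?, PySem.List.pyIdx?]
  have e2 : (PySem.List.pyGet? [d0, d1, d2, d3] (2 : Int)).getD 0 = d2 := by
    simp [PySem.List.pyGet?, PySem.List.pyIdx?]
  have e3 : (PySem.List.pyGet? [d0, d1, d2, d3] (3 : Int)).getD 0 = d3 := by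
    simp [PySem.List.pyGet?, PySem.List.pyIdx?]
  simp only [List.foldl_cons, List.foldl_nil,
    apply_ite (fun x : Int => (PySem.List.pyGet? [d0, d1, d2, d3] x).getD 0),
    apply_ite (Prod.fst : Int × Int → Int), apply_ite (Prod.snd : Int × Int → Int),
    e0, e1, e2, e3]
  split_ifs <;> omega

-- ===== VERDICT (by name: the statement is the Claim_ definition above) =====
theorem mostFar_spec : Claim_equal_mostFar := by
  intro frames c ref _ _
  unfold Spec_mostFar
  have h4 : PySem.List.pyRange 0 4 1 = [0, 1, 2, 3] := by decide
  simp only [mostFar, mostFar_alt, h4, List.map_cons, List.map_nil]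
  rw [pvSweep_eq_foldl]
  generalize (PySem.List.pyGet? ((PySem.List.pyGet? frames 0).getD []) 0).getD 0 = v0
  generalize (PySem.List.pyGet? ((PySem.List.pyGet? frames 1).getD []) 0).getD 0 = v1
  generalize (PySem.List.pyGet? ((PySem.List.pyGet? frames 2).getD []) 0).getD 0 = v2
  generalize (PySem.List.pyGet? ((PySem.List.pyGet? frames 3).getD []) 0).getD 0 = v3
  have hfold : (PySem.List.pyRange (c + 1) ref.length 1).foldl
      (fun s j => pvStepB ref c j s) [(v0, (none : Option Int)), (v1, none), (v2, none), (v3, none)]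
      = [v0, v1, v2, v3].map (fun v =>
          (PySem.List.pyRange (c + 1) ref.length 1).foldl
            (fun (q : Int × Option Int) j =>
              if q.2 = none ∧ q.1 = (PySem.List.pyGet? ref j).getD 0 then (q.1, some (j - c)) else q)
            (v, none)) := by
    simp only [pvStepB]
    exact foldl_map_step _ _ [v0, v1, v2, v3] (fun v => (v, none))
  rw [hfold]
  simp only [List.map_cons, List.map_nil]
  have hb : ∀ v : Int,
      (((PySem.List.pyRange (c + 1) ref.length 1).foldl
          (fun (q : Int × Option Int) j =>
            if q.2 = none ∧ q.1 = (PySem.List.pyGet? ref j).getD 0 then (q.1, some (j - c)) else q)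
          (v, none)).2.getD 100)
        = (match pvScanA ref v (PySem.List.pyRange (c + 1) ref.length 1) 1 with
           | some d => d | none => 100) := by
    intro v
    have := entry_eq_scan ref c ref.length (((ref.length : Int) - (c + 1)).toNat) (c + 1) rfl v
    simpa [show c + 1 - c = (1 : Int) by ring] using this
  simp only [hb]
  exact sel_eq _ _ _ _
    (match_pos ref v0 _ 1 one_pos) (match_pos ref v1 _ 1 one_pos)
    (match_pos ref v2 _ 1 one_pos) (match_pos ref v3 _ 1 one_pos)
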